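-- pv_equiv track=rewrite | github.com/levani-b/leetcode-solutions | LC-3591-CheckIfAnyElementHasPrimeFrequency.py | checkPrimeFrequency
-- ===== SOURCE A (Python) =====
-- from typing import List
--
-- def checkPrimeFrequency(nums: List[int]) -> bool:
--     def is_prime(n):
--         if n <= 1:
--             return False
--         if n <= 3:
--             return True
--         if n % 2 == 0 or n % 3 == 0:
--             return False
--
--         i = 5
--         while i * i <= n:
--             if n % i == 0 or n % (i + 2) == 0:
--                 return False
--             i += 6
--         return True
--
--     frequency = {}
--
--     for num in nums:
--         if num in frequency:
--             frequency[num] += 1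
--         else:
--             frequency[num] = 1
--
--     for num, freq in frequency.items():
--         if is_prime(freq):
--             return True
--
--     return False
-- ===== SOURCE B (Python) =====
-- from typing import List
--
-- def checkPrimeFrequency(nums: List[int]) -> bool:
--     freq = {}
--     for x in nums:
--         freq[x] = freq.get(x, 0) + 1
--     if not freq:
--         return False
--     values = list(freq.values())
--     m = max(values)
--     sieve = [False, False] + [True] * (m - 1)
--     for p in range(2, m + 1):
--         for q in range(2 * p, m + 1, p):
--             sieve[q] = False
--     return any(sieve[f] for f in values)
-- ===== Notes on version B (the rewrite author's own statement) =====
-- stated objective: alternative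
-- what changed: replaces per-frequency 6k±1 trial division with a Sieve of Eratosthenes boolean table built once up to the maximum frequency, then a single any() over the table
import Mathlib
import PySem

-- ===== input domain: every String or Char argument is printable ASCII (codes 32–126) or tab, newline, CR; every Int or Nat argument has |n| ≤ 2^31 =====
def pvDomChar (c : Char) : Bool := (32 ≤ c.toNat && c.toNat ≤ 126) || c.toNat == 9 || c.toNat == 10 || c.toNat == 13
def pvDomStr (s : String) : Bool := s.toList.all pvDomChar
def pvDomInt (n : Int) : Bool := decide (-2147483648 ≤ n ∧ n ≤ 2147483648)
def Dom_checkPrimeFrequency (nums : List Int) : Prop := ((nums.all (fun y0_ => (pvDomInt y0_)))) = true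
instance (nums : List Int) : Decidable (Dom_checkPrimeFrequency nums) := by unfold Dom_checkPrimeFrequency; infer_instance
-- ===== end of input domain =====

-- B replaces A's per-frequency 6k±1 trial division by a sieve table built once up to the
-- maximum frequency (objective: alternative algorithm of similar cost).

-- ===== PORT A =====
-- the 'while i * i <= n' loop of A's inner is_prime (i advances by 6)
def pvIsPrimeLoop (n i : Int) : Bool :=
  if n < i * i then true
  else if PySem.Int.mod n i == 0 || PySem.Int.mod n (i + 2) == 0 then false
  else pvIsPrimeLoop n (i + 6)
termination_by (n + 1 - i).toNat
decreasing_by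
  have h : ¬ n < i * i := by assumption
  have hii : 0 ≤ i * i := mul_self_nonneg i
  have hin : i ≤ n := by
    by_cases h0 : i ≤ 0
    · omega
    · have := le_mul_of_one_le_left (by omega : (0:ℤ) ≤ i) (by omega : (1:ℤ) ≤ i)
      omega
  omega

-- A's inner helper is_prime
def pvIsPrime (n : Int) : Bool :=
  if n ≤ 1 then false
  else if n ≤ 3 then true
  else if PySem.Int.mod n 2 == 0 || PySem.Int.mod n 3 == 0 then false
  else pvIsPrimeLoop n 5

def checkPrimeFrequency (nums : List Int) : Bool :=
  let frequency := nums.foldl (fun d num =>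
      if d.contains num then d.insert num (d.getD num 0 + 1)
      else d.insert num 1) PySem.Dict.empty
  -- 'for num, freq in frequency.items(): if is_prime(freq): return True / return False'
  frequency.items.any (fun p => pvIsPrime p.2)

-- ===== PORT B =====
def checkPrimeFrequency_alt (nums : List Int) : Bool :=
  let freq := nums.foldl (fun d x => d.insert x (d.getD x 0 + 1)) PySem.Dict.empty
  if freq.items = [] then false
  else
    let values := freq.values
    -- max(values): values is nonempty here, so max? is some and the default is unreachable
    let m := (PySem.List.max? values (fun v => v)).getD 0
    -- [False, False] + [True] * (m - 1)
    let sieve0 : List Bool := [false, false] ++ List.replicate (m - 1).toNat true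
    -- 'sieve[q] = False' with 0 ≤ 2*p ≤ q ≤ m < len(sieve): List.set q.toNat is exact here
    let sieve := (PySem.List.pyRange 2 (m + 1) 1).foldl (fun s p =>
        (PySem.List.pyRange (2 * p) (m + 1) p).foldl (fun s q => s.set q.toNat false) s) sieve0
    values.any (fun f => (PySem.List.pyGet? sieve f).getD false)

-- ===== PRECONDITION & SPEC =====
def Spec_checkPrimeFrequency (nums : List Int) (out : Bool) : Prop := out = checkPrimeFrequency_alt nums
instance (nums : List Int) (out : Bool) : Decidable (Spec_checkPrimeFrequency nums out) := by unfold Spec_checkPrimeFrequency; infer_instance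

-- ===== CLAIM (what is proved, stated in full; the proofs are below) =====
def Claim_equal_checkPrimeFrequency : Prop := ∀ (nums : List Int), Dom_checkPrimeFrequency nums → Spec_checkPrimeFrequency nums (checkPrimeFrequency nums)

-- ===== LEMMAS AND PROOFS =====

-- ---- A side: the 6k±1 wheel decides Nat.Prime ----

lemma pvIsPrimeLoop_iff (n : Int) : ∀ i : Int, 5 ≤ i → i % 6 = 5 →
    (pvIsPrimeLoop n i = true ↔
      ∀ d : Int, i ≤ d →
        ((d % 6 = 5 ∧ d * d ≤ n) ∨ (d % 6 = 1 ∧ (d - 2) * (d - 2) ≤ n)) → ¬ d ∣ n) := by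
  intro i
  induction i using pvIsPrimeLoop.induct (n := n) with
  | case1 i h =>
    intro hi5 hmod
    rw [pvIsPrimeLoop, if_pos h]
    simp only [true_iff]
    intro d hd hcase
    exfalso
    rcases hcase with ⟨_, hdd⟩ | ⟨hd1, hdd⟩
    · nlinarith
    · have : i + 2 ≤ d := by omega
      nlinarith
  | case2 i h h2 =>
    intro hi5 hmod
    rw [pvIsPrimeLoop, if_neg h, if_pos h2]
    simp only [Bool.or_eq_true, beq_iff_eq] at h2
    simp only [Bool.false_eq_true, false_iff]
    intro hall
    rcases h2 with hz | hz
    · exact hall i le_rfl (Or.inl ⟨hmod, not_lt.mp h⟩)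
        ((PySem.Int.mod_eq_zero_iff_dvd n i).mp hz)
    · refine hall (i + 2) (by omega) (Or.inr ⟨by omega, ?_⟩)
        ((PySem.Int.mod_eq_zero_iff_dvd n (i + 2)).mp hz)
      have he : i + 2 - 2 = i := by ring
      rw [he]; exact not_lt.mp h
  | case3 i h h2 ih =>
    intro hi5 hmod
    rw [pvIsPrimeLoop, if_neg h, if_neg h2]
    rw [ih (by omega) (by omega)]
    simp only [Bool.or_eq_true, beq_iff_eq, not_or] at h2
    constructor
    · intro hall d hd hcase
      by_cases h6 : i + 6 ≤ d
      · exact hall d h6 hcase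
      · -- i ≤ d < i + 6 with d % 6 ∈ {5, 1}: d = i or d = i + 2, neither divides n
        rcases hcase with ⟨h5, _⟩ | ⟨h1, _⟩
        · have hdi : d = i := by omega
          subst hdi
          exact fun hdvd => h2.1 ((PySem.Int.mod_eq_zero_iff_dvd n d).mpr hdvd)
        · have hdi : d = i + 2 := by omega
          subst hdi
          exact fun hdvd => h2.2 ((PySem.Int.mod_eq_zero_iff_dvd n (i + 2)).mpr hdvd)
    · intro hall d hd hcase
      exact hall d (by omega) hcase

lemma pvIsPrime_eq (n : Int) : pvIsPrime n = decide (Nat.Prime n.toNat) := by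
  unfold pvIsPrime
  split_ifs with h1 h2 h3
  · symm
    simp only [decide_eq_false_iff_not]
    intro hp
    have := hp.two_le
    omega
  · have h23 : n = 2 ∨ n = 3 := by omega
    rcases h23 with h | h <;> subst h <;> decide
  · simp only [Bool.or_eq_true, beq_iff_eq] at h3
    symm
    simp only [decide_eq_false_iff_not]
    intro hp
    rcases h3 with hz | hz
    · have hdvd : (2:ℤ) ∣ n := (PySem.Int.mod_eq_zero_iff_dvd n 2).mp hz
      have hdn : (2:ℕ) ∣ n.toNat := by omega
      rcases hp.eq_one_or_self_of_dvd 2 hdn with h | h <;> omega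
    · have hdvd : (3:ℤ) ∣ n := (PySem.Int.mod_eq_zero_iff_dvd n 3).mp hz
      have hdn : (3:ℕ) ∣ n.toNat := by omega
      rcases hp.eq_one_or_self_of_dvd 3 hdn with h | h <;> omega
  · simp only [Bool.or_eq_true, beq_iff_eq, not_or] at h3
    have hnd2 : ¬ (2:ℤ) ∣ n := fun hd => h3.1 ((PySem.Int.mod_eq_zero_iff_dvd n 2).mpr hd)
    have hnd3 : ¬ (3:ℤ) ∣ n := fun hd => h3.2 ((PySem.Int.mod_eq_zero_iff_dvd n 3).mpr hd)
    have hn5 : 5 ≤ n := by omega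
    have hN : (n.toNat : ℤ) = n := by omega
    have hBig : (∀ d : Int, 5 ≤ d →
        ((d % 6 = 5 ∧ d * d ≤ n) ∨ (d % 6 = 1 ∧ (d - 2) * (d - 2) ≤ n)) → ¬ d ∣ n)
        ↔ Nat.Prime n.toNat := by
      constructor
      · intro hall
        by_contra hnp
        have hpp : Nat.Prime n.toNat.minFac := Nat.minFac_prime (by omega)
        have hpd : n.toNat.minFac ∣ n.toNat := Nat.minFac_dvd _
        have hpsq : n.toNat.minFac ^ 2 ≤ n.toNat := Nat.minFac_sq_le_self (by omega) hnp
        set p := n.toNat.minFac with hpdef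
        have hp2 : p ≠ 2 := by
          intro h
          rw [h] at hpd
          exact hnd2 (by omega)
        have hp3 : p ≠ 3 := by
          intro h
          rw [h] at hpd
          exact hnd3 (by omega)
        have hnd2p : ¬ (2:ℕ) ∣ p :=
          fun hd => hp2 ((hpp.eq_one_or_self_of_dvd 2 hd).resolve_left (by omega)).symm
        have hnd3p : ¬ (3:ℕ) ∣ p :=
          fun hd => hp3 ((hpp.eq_one_or_self_of_dvd 3 hd).resolve_left (by omega)).symm
        have hple : 2 ≤ p := hpp.two_le
        have hp6 : p % 6 = 1 ∨ p % 6 = 5 := by omega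
        have hp5 : 5 ≤ p := by omega
        have hp5Z : (5:ℤ) ≤ (p:ℤ) := by exact_mod_cast hp5
        have hdvdZ : (p:ℤ) ∣ n := by
          rcases hpd with ⟨c, hc⟩
          exact ⟨(c:ℤ), by rw [← hN]; exact_mod_cast hc⟩
        have hpsq' : p * p ≤ n.toNat := by nlinarith [hpsq]
        have hsqZ : (p:ℤ) * (p:ℤ) ≤ n := by
          rw [← hN]; exact_mod_cast hpsq'
        rcases hp6 with h6 | h6
        · -- p % 6 = 1, p ≥ 7: the wheel tests p as 'i + 2', bound (p-2)^2 ≤ n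
          have hp7 : 7 ≤ p := by omega
          have hp7Z : (7:ℤ) ≤ (p:ℤ) := by exact_mod_cast hp7
          refine hall (p:ℤ) hp5Z (Or.inr ⟨by omega, ?_⟩) hdvdZ
          nlinarith [hsqZ, hp7Z]
        · exact hall (p:ℤ) hp5Z (Or.inl ⟨by omega, hsqZ⟩) hdvdZ
      · intro hp d hd5 hcase hdvd
        have hdpos : (0:ℤ) < d := by omega
        have hdvdN : d.toNat ∣ n.toNat := by
          rcases hdvd with ⟨c, hc⟩
          have hc0 : 0 ≤ c := by
            by_contra hcn
            have hcneg : c < 0 := by omega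
            have : d * c < 0 := mul_neg_of_pos_of_neg hdpos hcneg
            omega
          refine ⟨c.toNat, ?_⟩
          have hcast : ((n.toNat : ℤ)) = ((d.toNat * c.toNat : ℕ) : ℤ) := by
            push_cast
            rw [Int.toNat_of_nonneg (by omega : (0:ℤ) ≤ d), Int.toNat_of_nonneg hc0, hN, hc]
          exact_mod_cast hcast
        rcases hp.eq_one_or_self_of_dvd d.toNat hdvdN with h | h
        · omega
        · have hdn : d = n := by omega
          subst hdn
          rcases hcase with ⟨_, hdd⟩ | ⟨h61, hdd⟩
          · nlinarith
          · have h7 : 7 ≤ d := by omega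
            nlinarith [mul_nonneg (by omega : (0:ℤ) ≤ d - 7) (by omega : (0:ℤ) ≤ d - 2)]
    have hprop := (pvIsPrimeLoop_iff n 5 (by norm_num) (by decide)).trans hBig
    cases hb : pvIsPrimeLoop n 5
    · symm
      simp only [decide_eq_false_iff_not]
      intro hp
      have := hprop.mpr hp
      rw [hb] at this
      exact absurd this (by simp)
    · symm
      simp only [decide_eq_true_eq]
      exact hprop.mp hb

-- ---- B side: the sieve table decides Nat.Prime ----

lemma foldl_set_length (qs : List Int) (s : List Bool) :
    (qs.foldl (fun s q => s.set q.toNat false) s).length = s.length := by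
  induction qs generalizing s with
  | nil => rfl
  | cons q t ih => simp [ih]

lemma foldl_set_getD (qs : List Int) (s : List Bool) (k : Nat)
    (hq : ∀ q ∈ qs, q.toNat < s.length) :
    (qs.foldl (fun s q => s.set q.toNat false) s).getD k false
      = ((s.getD k false) && !(qs.any (fun q => q.toNat == k))) := by
  induction qs generalizing s with
  | nil => simp
  | cons q t ih =>
    simp only [List.foldl_cons, List.any_cons]
    rw [ih _ (fun q' hq' => by
      rw [List.length_set]; exact hq q' (List.mem_cons_of_mem _ hq'))]
    by_cases hqk : q.toNat = k
    · subst hqk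
      have hlen : q.toNat < s.length := hq q (List.mem_cons_self)
      simp [List.getD_eq_getElem?_getD, hlen]
    · have hbeq : (q.toNat == k) = false := by simpa using hqk
      simp [List.getD_eq_getElem?_getD, List.getElem?_set, hqk, hbeq]

lemma outer_fold_getD (m : Int) (ps : List Int) (s : List Bool)
    (hs : ((s.length : ℕ) : ℤ) = m + 1) (hp : ∀ p ∈ ps, 2 ≤ p) (k : Nat) :
    (ps.foldl (fun s p =>
        (PySem.List.pyRange (2 * p) (m + 1) p).foldl (fun s q => s.set q.toNat false) s) s).getD k false
      = ((s.getD k false) &&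
          !(ps.any (fun p => (PySem.List.pyRange (2 * p) (m + 1) p).any (fun q => q.toNat == k)))) := by
  induction ps generalizing s with
  | nil => simp
  | cons p t ih =>
    simp only [List.foldl_cons, List.any_cons]
    have hp2 : (2:ℤ) ≤ p := hp p (List.mem_cons_self)
    have hqlt : ∀ q ∈ PySem.List.pyRange (2 * p) (m + 1) p, q.toNat < s.length := by
      intro q hqmem
      have := (PySem.List.mem_pyRange_iff_of_pos (by omega : (0:ℤ) < p) q).mp hqmem
      omega
    rw [ih _ (by rw [foldl_set_length]; exact hs) (fun p' hp' => hp p' (List.mem_cons_of_mem _ hp'))]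
    rw [foldl_set_getD _ _ _ hqlt]
    cases s.getD k false <;> simp

lemma sieve0_getD (m : Int) (hm : 1 ≤ m) (k : Nat) (hk : (k:Int) ≤ m) :
    (([false, false] ++ List.replicate (m - 1).toNat true).getD k false) = decide (2 ≤ k) := by
  match k with
  | 0 => simp
  | 1 => simp
  | (j+2) =>
    have hj' : j < m.toNat - 1 := by omega
    simp [List.getD_eq_getElem?_getD, hj']

lemma marked_iff (m : Int) (k : Nat) (h2 : 2 ≤ k) (hk : (k:Int) ≤ m) :
    ((PySem.List.pyRange 2 (m + 1) 1).any
        (fun p => (PySem.List.pyRange (2 * p) (m + 1) p).any (fun q => q.toNat == k)))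
      = !decide (Nat.Prime k) := by
  have hiff : (∃ p ∈ PySem.List.pyRange 2 (m + 1) 1,
      ∃ q ∈ PySem.List.pyRange (2 * p) (m + 1) p, q.toNat = k) ↔ ¬ Nat.Prime k := by
    constructor
    · rintro ⟨p, hpmem, q, hqmem, hqk⟩
      have hpb := PySem.List.mem_pyRange_one.mp hpmem
      have hqb := (PySem.List.mem_pyRange_iff_of_pos (by omega : (0:ℤ) < p) q).mp hqmem
      have hpq : p ∣ q := by
        have := dvd_add hqb.2.2 (dvd_mul_left p 2)
        simpa using this
      have hkq : (k:ℤ) = q := by omega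
      have hpP : ((p.toNat : ℕ) : ℤ) = p := by omega
      have hPd : p.toNat ∣ k := by
        have hzz : ((p.toNat : ℕ) : ℤ) ∣ ((k:ℕ) : ℤ) := by rw [hpP, hkq]; exact hpq
        exact_mod_cast hzz
      have hP2 : 2 ≤ p.toNat := by omega
      have hPk : 2 * p.toNat ≤ k := by omega
      intro hpr
      rcases hpr.eq_one_or_self_of_dvd p.toNat hPd with h | h <;> omega
    · intro hnp
      have hPp : Nat.Prime k.minFac := Nat.minFac_prime (by omega)
      have hPd : k.minFac ∣ k := Nat.minFac_dvd k
      have hPk : k.minFac ≠ k := fun h => hnp (Nat.prime_def_minFac.mpr ⟨h2, h⟩)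
      have hPlt : k.minFac < k := lt_of_le_of_ne (Nat.le_of_dvd (by omega) hPd) hPk
      have hP2 : 2 ≤ k.minFac := hPp.two_le
      have h2P : 2 * k.minFac ≤ k := by
        rcases hPd with ⟨c, hc⟩
        have hcz : c ≠ 0 := by rintro rfl; simp at hc; omega
        have hco : c ≠ 1 := by rintro rfl; simp at hc; exact hPk hc.symm
        have hmul : k.minFac * 2 ≤ k.minFac * c := Nat.mul_le_mul_left _ (by omega)
        linarith [hmul, hc.ge, hc.le]
      refine ⟨(k.minFac : ℤ), ?_, (k : ℤ), ?_, by simp⟩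
      · exact PySem.List.mem_pyRange_one.mpr ⟨by omega, by omega⟩
      · refine (PySem.List.mem_pyRange_iff_of_pos
          (by omega : (0:ℤ) < (k.minFac : ℤ)) _).mpr ⟨by omega, by omega, ?_⟩
        have hdz : ((k.minFac : ℕ) : ℤ) ∣ ((k:ℕ) : ℤ) := by exact_mod_cast hPd
        exact dvd_sub hdz (dvd_mul_left _ 2)
  have hany : ((PySem.List.pyRange 2 (m + 1) 1).any
      (fun p => (PySem.List.pyRange (2 * p) (m + 1) p).any (fun q => q.toNat == k))) = true
        ↔ ¬ Nat.Prime k := by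
    simp only [List.any_eq_true, beq_iff_eq]
    exact hiff
  by_cases hp : Nat.Prime k
  · simp only [hp, decide_true, Bool.not_true]
    exact Bool.eq_false_iff.mpr (fun hb => (hany.mp hb) hp)
  · simp only [hp, decide_false, Bool.not_false]
    exact hany.mpr hp

lemma sieve_char (m : Int) (hm : 1 ≤ m) (k : Nat) (hk : (k:Int) ≤ m) :
    (((PySem.List.pyRange 2 (m + 1) 1).foldl (fun s p =>
        (PySem.List.pyRange (2 * p) (m + 1) p).foldl (fun s q => s.set q.toNat false) s)
        ([false, false] ++ List.replicate (m - 1).toNat true)).getD k false)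
      = decide (Nat.Prime k) := by
  have hlen : ((([false, false] ++ List.replicate (m - 1).toNat true).length : ℕ) : ℤ) = m + 1 := by
    simp
    omega
  rw [outer_fold_getD m _ _ hlen (fun p hp => (PySem.List.mem_pyRange_one.mp hp).1) k]
  rw [sieve0_getD m hm k hk]
  by_cases h2 : 2 ≤ k
  · rw [marked_iff m k h2 hk]
    by_cases hp : Nat.Prime k <;> simp [h2, hp]
  · have hnp : ¬ Nat.Prime k := fun hp => absurd hp.two_le (by omega)
    simp [h2, hnp]

-- ---- glue: both programs reduce to primality of the counts of the distinct elements ----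

theorem pv_main (nums : List Int) : checkPrimeFrequency nums = checkPrimeFrequency_alt nums := by
  have hstep : ∀ (acc : PySem.Dict Int Int), ∀ x ∈ nums,
      (if acc.contains x then acc.insert x (acc.getD x 0 + 1) else acc.insert x 1)
        = acc.insert x (acc.getD x 0 + 1) := by
    intro acc x _
    by_cases h : acc.contains x = true
    · simp [h]
    · have hf : acc.contains x = false := by simpa using h
      rw [if_neg (by simp [hf]), PySem.Dict.getD_of_not_contains acc 0 hf]
      norm_num
  have hfold : nums.foldl (fun d num =>
      if d.contains num then d.insert num (d.getD num 0 + 1) else d.insert num 1)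
      (PySem.Dict.empty : PySem.Dict Int Int) = PySem.Dict.counter nums := by
    rw [PySem.List.foldl_congr_mem nums _ (fun d x => d.insert x (d.getD x 0 + 1))
        PySem.Dict.empty hstep,
      PySem.Dict.foldl_insert_getD_add_one_eq_counter]
  have hfoldB := PySem.Dict.foldl_insert_getD_add_one_eq_counter nums
  rcases nums with _ | ⟨x, t⟩
  · decide
  · have hvals : (PySem.Dict.counter (x :: t)).values
        = (PySem.Set.ofList (x :: t)).map (fun k => ((x :: t).count k : ℤ)) := by
      simp only [PySem.Dict.values, PySem.Dict.items_counter, List.map_map]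
      rfl
    have hx : x ∈ PySem.Set.ofList (x :: t) := by
      simp [PySem.Set.mem_ofList]
    have hsetne : PySem.Set.ofList (x :: t) ≠ [] := by
      intro h; rw [h] at hx; simp at hx
    simp only [checkPrimeFrequency, checkPrimeFrequency_alt, hfold, hfoldB,
      PySem.Dict.items_counter, hvals, List.map_eq_nil_iff]
    rw [if_neg hsetne]
    have hvne : (PySem.Set.ofList (x :: t)).map (fun k => ((x :: t).count k : ℤ)) ≠ [] := by
      simpa using hsetne
    obtain ⟨m, hm⟩ := Option.ne_none_iff_exists'.mp
      (fun hnone => hvne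
        ((PySem.List.max?_eq_none_iff
            ((PySem.Set.ofList (x :: t)).map (fun k => ((x :: t).count k : ℤ)))
            (fun v : ℤ => v)).mp hnone))
    rw [hm]
    simp only [Option.getD_some]
    have hmax : ∀ v ∈ (PySem.Set.ofList (x :: t)).map (fun k => ((x :: t).count k : ℤ)), v ≤ m :=
      PySem.List.max?_isMax hm
    have hm1 : 1 ≤ m := by
      have hmem := PySem.List.max?_mem hm
      obtain ⟨k0, hk0, hk0m⟩ := List.mem_map.mp hmem
      have := List.count_pos_iff.mpr ((PySem.Set.mem_ofList (x :: t) k0).mp hk0)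
      omega
    rw [List.any_map, List.any_map]
    apply PySem.List.any_congr_mem
    intro k hk
    simp only [Function.comp_apply]
    have hc1 : 1 ≤ ((x :: t).count k : ℤ) := by
      have := List.count_pos_iff.mpr ((PySem.Set.mem_ofList (x :: t) k).mp hk)
      omega
    have hcm : ((x :: t).count k : ℤ) ≤ m :=
      hmax _ (List.mem_map.mpr ⟨k, hk, rfl⟩)
    rw [PySem.List.pyGet?_natCast, ← List.getD_eq_getElem?_getD,
      sieve_char m hm1 _ hcm, pvIsPrime_eq]
    simp

-- ===== VERDICT (by name: the statement is the Claim_ definition above) =====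
theorem checkPrimeFrequency_spec : Claim_equal_checkPrimeFrequency := by
  intro nums _
  unfold Spec_checkPrimeFrequency
  exact pv_main nums
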